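-- pv_equiv track=rewrite | github.com/KiritoKazut0/genetic-algorithm | src/utils/crossover_utils.py | reparar_con_diferencia
-- ===== SOURCE A (Python) =====
-- def reparar_con_diferencia(hijo, padre):
--     vistos = set()
--     duplicados_indices = []
--
--     for i, gen in enumerate(hijo):
--         if gen in vistos:
--             duplicados_indices.append(i)
--         else:
--             vistos.add(gen)
--     faltantes = [g for g in padre if g not in vistos]
--
--     for i in duplicados_indices:
--         hijo[i] = faltantes.pop(0)
--
--     return hijo
-- ===== SOURCE B (Python) =====
-- def reparar_con_diferencia(hijo, padre):
--     restantes = {}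
--     for gen in hijo:
--         restantes[gen] = restantes.get(gen, 0) + 1
--     dups = len(hijo) - len(restantes)
--     reemplazos = [g for g in padre if g not in restantes][:dups]
--     for i in reversed(range(len(hijo))):
--         restantes[hijo[i]] -= 1
--         if restantes[hijo[i]] > 0:
--             hijo[i] = reemplazos.pop()
--     return hijo
-- ===== Notes on version B (the rewrite author's own statement) =====
-- stated objective: alternative
-- what changed: B builds a gene-frequency counter once, derives the duplicate count from it, truncates the missing-gene list to that count, and repairs the child in a single backward pass (reversed(range(n))) that decrements the counter to detect duplicates and pops replacements from the tail, instead of A's seen-set forward scan recording duplicate indices plus a second patch loop popping from the front.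
import Mathlib
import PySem

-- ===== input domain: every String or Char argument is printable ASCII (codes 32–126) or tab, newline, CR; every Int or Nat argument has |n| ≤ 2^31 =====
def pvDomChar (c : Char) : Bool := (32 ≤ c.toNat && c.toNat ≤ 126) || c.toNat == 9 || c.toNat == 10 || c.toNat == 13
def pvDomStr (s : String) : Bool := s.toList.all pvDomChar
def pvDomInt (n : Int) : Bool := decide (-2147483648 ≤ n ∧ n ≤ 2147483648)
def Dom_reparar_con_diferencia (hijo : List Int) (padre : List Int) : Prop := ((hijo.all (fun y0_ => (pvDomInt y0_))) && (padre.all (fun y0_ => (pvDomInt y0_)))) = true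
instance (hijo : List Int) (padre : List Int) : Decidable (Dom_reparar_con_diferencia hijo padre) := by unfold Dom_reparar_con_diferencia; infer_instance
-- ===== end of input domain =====

-- B detects duplicates with a frequency counter and repairs them in a single BACKWARD pass,
-- popping replacements from the tail of the (truncated) missing-gene list; both Pythons mutate
-- `hijo` in place identically, and the equivalence proved here is about the return value.

-- ===== PORT A =====
-- first loop of A: thread `vistos`, collect duplicate indices in order
def aScan (l : List (Int × Int)) (v : PySem.Set Int) : PySem.Set Int × List Int :=
  match l with
  | [] => (v, [])
  | (i, g) :: rest =>
    if PySem.Set.contains v g then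
      let r := aScan rest v
      (r.1, i :: r.2)
    else aScan rest (PySem.Set.add v g)

-- second loop of A: hijo[i] = faltantes.pop(0); headD 0 only makes the pop total
-- (Pre_ excludes the inputs where Python's pop(0) raises IndexError)
def aFix (ds : List Int) (h : List Int) (f : List Int) : List Int :=
  match ds with
  | [] => h
  | i :: rest => aFix rest (h.set i.toNat (f.headD 0)) f.tail

def reparar_con_diferencia (hijo : List Int) (padre : List Int) : List Int :=
  let r := aScan (PySem.List.enumerate hijo) PySem.Set.empty
  let faltantes := padre.filter (fun g => !(PySem.Set.contains r.1 g))
  aFix r.2 hijo faltantes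

-- ===== PORT B =====
-- B's backward loop over `reversed(range(len(hijo)))`: decrement the counter of hijo[i]; if a
-- copy remains earlier in the list this occurrence is a duplicate and gets `reemplazos.pop()`.
-- `restantes[hijo[i]] -= 1` is ported as insert with getD (the key is always present);
-- pop() on the tail is getLastD/dropLast, total only where Pre_ excludes Python's IndexError;
-- indices i are the in-range naturals n-1..0, so plain List.getD reads hijo[i] exactly.
def bBack (h : List Int) (r : List Int) (c : PySem.Dict Int Int) : List Nat → List Int
  | [] => h
  | i :: rest =>
    let g := h.getD i 0
    let c' := c.insert g (c.getD g 0 - 1)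
    if 0 < c'.getD g 0 then bBack (h.set i (r.getLastD 0)) r.dropLast c' rest
    else bBack h r c' rest

def reparar_con_diferencia_alt (hijo : List Int) (padre : List Int) : List Int :=
  let restantes := hijo.foldl (fun d g => d.insert g (d.getD g 0 + 1)) PySem.Dict.empty
  let dups := hijo.length - restantes.size
  let reemplazos := (padre.filter (fun g => !(restantes.contains g))).take dups
  bBack hijo reemplazos restantes (List.range hijo.length).reverse

-- ===== PRECONDITION & SPEC =====
-- Pre_ excludes exactly the inputs where both Pythons raise IndexError (popping from an
-- exhausted replacement list): more duplicate positions in hijo than genes of padre missing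
-- from hijo.
def Pre_reparar_con_diferencia (hijo : List Int) (padre : List Int) : Prop :=
  hijo.length - (PySem.Set.ofList hijo).length ≤ (padre.filter (fun g => !(hijo.contains g))).length
instance (hijo : List Int) (padre : List Int) : Decidable (Pre_reparar_con_diferencia hijo padre) := by unfold Pre_reparar_con_diferencia; infer_instance
def pvWitness_reparar_con_diferencia : List Int × List Int := ([1, 1, 2], [1, 2, 3])
def Spec_reparar_con_diferencia (hijo : List Int) (padre : List Int) (out : List Int) : Prop := out = reparar_con_diferencia_alt hijo padre
instance (hijo : List Int) (padre : List Int) (out : List Int) : Decidable (Spec_reparar_con_diferencia hijo padre out) := by unfold Spec_reparar_con_diferencia; infer_instance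

-- ===== CLAIM (what is proved, stated in full; the proofs are below) =====
def Claim_equal_reparar_con_diferencia : Prop := ∀ (hijo : List Int) (padre : List Int), Dom_reparar_con_diferencia hijo padre → Pre_reparar_con_diferencia hijo padre → Spec_reparar_con_diferencia hijo padre (reparar_con_diferencia hijo padre)

-- ===== LEMMAS AND PROOFS =====

-- the canonical "apply (index, value) patches front to front" function both sides reduce to
def aFixN (ds : List Nat) (h : List Int) (f : List Int) : List Int :=
  match ds with
  | [] => h
  | i :: rest => aFixN rest (h.set i (f.headD 0)) f.tail

-- forward duplicate scan with an explicit seen list (mirror of aScan's second component)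
def fwd (seen : List Int) (k : Nat) : List Int → List Nat
  | [] => []
  | g :: rest => if seen.contains g then k :: fwd seen (k + 1) rest
                 else fwd (g :: seen) (k + 1) rest

-- canonical increasing duplicate indices of hijo in [m, m + xs.length), condition read off hijo
def cdupAux (hijo : List Int) (m : Nat) : List Int → List Nat
  | [] => []
  | _ :: rest =>
    (if (hijo.take m).contains (hijo.getD m 0) then [m] else []) ++ cdupAux hijo (m + 1) rest

-- the same duplicate indices, below k, in DECREASING order (the order B repairs them in)
def ddec (hijo : List Int) : Nat → List Nat
  | 0 => []
  | k + 1 => (if (hijo.take k).contains (hijo.getD k 0) then [k] else []) ++ ddec hijo k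

-- the set accumulated by A's first loop is s updated with all genes of hijo
theorem aScan_fst (xs : List Int) (s : PySem.Set Int) (k : Int) :
    (aScan (PySem.List.enumerate xs k) s).1 = PySem.Set.update s xs := by
  induction xs generalizing s k with
  | nil => rfl
  | cons x rest ih =>
    rw [PySem.List.enumerate_cons, PySem.Set.update_cons]
    by_cases hx : x ∈ s
    · have hadd : PySem.Set.add s x = s := PySem.Set.add_of_mem hx
      simp [aScan, hx, ih]
    · simp [aScan, hx, ih]

-- A's duplicate-index list, via the seen-list mirror
theorem aScan_snd (xs : List Int) (seen : List Int) (v : PySem.Set Int) (k : Nat)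
    (hmem : ∀ g : Int, PySem.Set.contains v g = seen.contains g) :
    (aScan (PySem.List.enumerate xs (k : Int)) v).2 = (fwd seen k xs).map Int.ofNat := by
  induction xs generalizing seen v k with
  | nil => rfl
  | cons x rest ih =>
    rw [PySem.List.enumerate_cons]
    have hk1 : ((k : Int) + 1) = ((k + 1 : Nat) : Int) := by push_cast; ring
    by_cases hx : x ∈ seen
    · have hv : PySem.Set.contains v x = true := by
        rw [hmem]; simpa using hx
      simp only [aScan, fwd, hv, if_true, if_pos (show (seen.contains x) = true by simpa using hx), hk1,
        ih seen v (k+1) hmem]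
      simp
    · have hv : PySem.Set.contains v x = false := by
        rw [hmem]; simpa using hx
      have hmem' : ∀ g : Int, PySem.Set.contains (PySem.Set.add v x) g = (x :: seen).contains g := by
        intro g
        have : g ∈ PySem.Set.add v x ↔ g ∈ v ∨ g = x := PySem.Set.mem_add v x g
        have hvg := hmem g
        simp only [PySem.Set.contains, List.contains_eq_mem] at *
        by_cases hgv : g ∈ v <;> by_cases hgx : g = x <;> simp_all
      simp only [aScan, fwd, hv, Bool.false_eq_true, if_false, hk1,
        ih (x :: seen) (PySem.Set.add v x) (k+1) hmem']
      rw [if_neg (show ¬ (seen.contains x = true) by simpa using hx)]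

-- the seen-list scan computes the canonical duplicate indices of hijo
theorem fwd_eq_cdupAux (hijo : List Int) (xs seen : List Int) (m : Nat)
    (hxs : xs = hijo.drop m)
    (hmem : ∀ g : Int, seen.contains g = (hijo.take m).contains g) :
    fwd seen m xs = cdupAux hijo m xs := by
  induction xs generalizing seen m with
  | nil => rfl
  | cons g rest ih =>
    have hm : m < hijo.length := by
      by_contra hge
      simp [List.drop_eq_nil_of_le (Nat.le_of_not_lt hge)] at hxs
    have hget : hijo.getD m 0 = g := by
      have h1 : hijo[m]? = some g := by
        rw [← List.head?_drop, ← hxs]; rfl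
      simp [List.getD_eq_getElem?_getD, h1]
    have hrest : rest = hijo.drop (m + 1) := by
      rw [← List.tail_drop, ← hxs]; rfl
    have htake : hijo.take (m + 1) = hijo.take m ++ [g] := by
      rw [← List.take_concat_get (l := hijo) hm, List.concat_eq_append, ← hget]
      simp [List.getD_eq_getElem?_getD, List.getElem?_eq_getElem hm]
    by_cases hg : g ∈ hijo.take m
    · have hc : seen.contains g = true := by rw [hmem]; simpa using hg
      have hmem' : ∀ x : Int, seen.contains x = (hijo.take (m+1)).contains x := by
        intro x
        rw [hmem x, htake]
        by_cases hxg : x = g <;> simp_all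
      simp only [fwd, cdupAux, hc, if_true, hget]
      simp [hg, ih seen (m + 1) hrest hmem']
    · have hc : seen.contains g = false := by rw [hmem]; simpa using hg
      have hmem' : ∀ x : Int, (g :: seen).contains x = (hijo.take (m+1)).contains x := by
        intro x
        rw [htake]
        by_cases hxg : x = g <;> simp_all
      simp only [fwd, cdupAux, hc, Bool.false_eq_true, if_false, hget]
      simp [hg, ih (g :: seen) (m + 1) hrest hmem']

theorem cdupAux_ge (hijo : List Int) (xs : List Int) (m : Nat) :
    ∀ i ∈ cdupAux hijo m xs, m ≤ i := by
  induction xs generalizing m with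
  | nil => simp [cdupAux]
  | cons x rest ih =>
    intro i hi
    simp only [cdupAux, List.mem_append] at hi
    rcases hi with hi | hi
    · split at hi <;> simp_all
    · exact Nat.le_of_succ_le (ih (m + 1) i hi)

theorem cdupAux_pairwise (hijo : List Int) (xs : List Int) (m : Nat) :
    (cdupAux hijo m xs).Pairwise (· < ·) := by
  induction xs generalizing m with
  | nil => simp [cdupAux]
  | cons x rest ih =>
    simp only [cdupAux]
    rw [List.pairwise_append]
    refine ⟨by split <;> simp, ih (m + 1), ?_⟩
    intro a ha b hb
    have hb' := cdupAux_ge hijo rest (m + 1) b hb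
    have : a = m := by split at ha <;> simp_all
    omega

theorem cdupAux_append (hijo : List Int) (xs : List Int) (y : Int) (m : Nat) :
    cdupAux hijo m (xs ++ [y]) = cdupAux hijo m xs ++
      (if (hijo.take (m + xs.length)).contains (hijo.getD (m + xs.length) 0)
        then [m + xs.length] else []) := by
  induction xs generalizing m with
  | nil => simp [cdupAux]
  | cons x rest ih =>
    simp only [List.cons_append, cdupAux, ih (m + 1), List.length_cons, List.append_assoc]
    ring_nf

theorem ddec_eq (hijo : List Int) (k : Nat) (hk : k ≤ hijo.length) :
    cdupAux hijo 0 (hijo.take k) = (ddec hijo k).reverse := by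
  induction k with
  | zero => simp [cdupAux, ddec]
  | succ k ih =>
    have hklt : k < hijo.length := hk
    have htake : hijo.take (k + 1) = hijo.take k ++ [hijo.getD k 0] := by
      rw [← List.take_concat_get (l := hijo) hklt, List.concat_eq_append]
      simp [List.getD_eq_getElem?_getD, List.getElem?_eq_getElem hklt]
    rw [htake, cdupAux_append, ih (Nat.le_of_succ_le hk)]
    simp [ddec, List.length_take, Nat.min_eq_left (Nat.le_of_succ_le hk)]
    split <;> simp

-- B's backward loop performs the decreasing-order patches ddec prescribes
theorem bBack_eq (hijo : List Int) (k : Nat) (h r : List Int) (c : PySem.Dict Int Int)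
    (hk : k ≤ hijo.length)
    (hc : ∀ x : Int, c.getD x 0 = ((hijo.take k).count x : Int))
    (hh : ∀ j, j < k → h.getD j 0 = hijo.getD j 0) :
    bBack h r c (List.range k).reverse = aFixN (ddec hijo k) h r.reverse := by
  induction k generalizing h r c with
  | zero => simp [bBack, ddec, aFixN]
  | succ k ih =>
    have hklt : k < hijo.length := hk
    have hrange : (List.range (k + 1)).reverse = k :: (List.range k).reverse := by
      rw [List.range_succ]; simp
    set g := hijo.getD k 0 with hgdef
    have hget : h.getD k 0 = g := hh k (Nat.lt_succ_self k)
    have htake : hijo.take (k + 1) = hijo.take k ++ [g] := by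
      rw [hgdef, ← List.take_concat_get (l := hijo) hklt, List.concat_eq_append]
      simp [List.getD_eq_getElem?_getD, List.getElem?_eq_getElem hklt]
    have hc' : ∀ x : Int, (c.insert g (c.getD g 0 - 1)).getD x 0 = ((hijo.take k).count x : Int) := by
      intro x
      rw [PySem.Dict.getD_insert]
      by_cases hxg : x = g
      · subst hxg
        rw [if_pos rfl, hc g, htake]
        simp [List.count_append]
      · rw [if_neg hxg, hc x, htake]
        simp [List.count_append, Ne.symm hxg]
    have hcond : (0 < (c.insert g (c.getD g 0 - 1)).getD g 0) ↔ g ∈ hijo.take k := by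
      rw [hc' g]
      exact_mod_cast List.count_pos_iff
    rw [hrange]
    simp only [bBack, hget]
    by_cases hdup : g ∈ hijo.take k
    · rw [if_pos (by exact_mod_cast hcond.mpr hdup)]
      have hdd : ddec hijo (k + 1) = k :: ddec hijo k := by
        have hm : hijo.getD k 0 ∈ hijo.take k := hgdef ▸ hdup
        simp [ddec, List.getD_eq_getElem?_getD] at hm ⊢
        simp [hm]
      rw [hdd]
      have hhead : r.reverse.headD 0 = r.getLastD 0 := by
        cases r with
        | nil => rfl
        | cons a as =>
          rw [List.headD_eq_head?_getD, List.head?_reverse, List.getLastD_eq_getLast?]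
      have htail : r.reverse.tail = r.dropLast.reverse := List.tail_reverse
      simp only [aFixN, hhead, htail]
      exact ih (h.set k (r.getLastD 0)) r.dropLast _ (Nat.le_of_succ_le hk) hc'
        (fun j hj => by
          rw [List.getD_eq_getElem?_getD, List.getElem?_set_ne (by omega),
            ← List.getD_eq_getElem?_getD]
          exact hh j (Nat.lt_succ_of_lt hj))
    · rw [if_neg (by rw [hcond]; exact hdup)]
      have hdd : ddec hijo (k + 1) = ddec hijo k := by
        have hm : hijo.getD k 0 ∉ hijo.take k := hgdef ▸ hdup
        simp [ddec, List.getD_eq_getElem?_getD] at hm ⊢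
        simp [hm]
      rw [hdd]
      exact ih h r _ (Nat.le_of_succ_le hk) hc'
        (fun j hj => hh j (Nat.lt_succ_of_lt hj))

-- duplicates below k + distinct genes of the first k = k
theorem ddec_length (hijo : List Int) (k : Nat) (hk : k ≤ hijo.length) :
    (ddec hijo k).length + (PySem.Set.ofList (hijo.take k)).length = k := by
  induction k with
  | zero => simp [ddec, PySem.Set.ofList, PySem.Set.empty]
  | succ k ih =>
    have hklt : k < hijo.length := hk
    set g := hijo.getD k 0 with hgdef
    have htake : hijo.take (k + 1) = hijo.take k ++ [g] := by
      rw [hgdef, ← List.take_concat_get (l := hijo) hklt, List.concat_eq_append]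
      simp [List.getD_eq_getElem?_getD, List.getElem?_eq_getElem hklt]
    have hof : PySem.Set.ofList (hijo.take (k + 1))
        = PySem.Set.add (PySem.Set.ofList (hijo.take k)) g := by
      rw [htake]
      simp [PySem.Set.ofList, List.foldl_append]
    have ih' := ih (Nat.le_of_succ_le hk)
    by_cases hdup : g ∈ hijo.take k
    · have hmem : g ∈ PySem.Set.ofList (hijo.take k) := (PySem.Set.mem_ofList _ g).mpr hdup
      rw [hof, PySem.Set.add_of_mem hmem]
      have hm : hijo.getD k 0 ∈ hijo.take k := hgdef ▸ hdup
      simp only [ddec]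
      simp [List.getD_eq_getElem?_getD] at hm
      simp [hm, List.getD_eq_getElem?_getD]
      omega
    · have hmem : g ∉ PySem.Set.ofList (hijo.take k) := fun hm =>
        hdup ((PySem.Set.mem_ofList _ g).mp hm)
      have hadd : PySem.Set.add (PySem.Set.ofList (hijo.take k)) g
          = PySem.Set.ofList (hijo.take k) ++ [g] := by
        simp only [PySem.Set.add, PySem.Set.contains]
        rw [if_neg (by simpa using hmem)]
      rw [hof, hadd]
      have hm : hijo.getD k 0 ∉ hijo.take k := hgdef ▸ hdup
      simp only [ddec]
      simp [List.getD_eq_getElem?_getD] at hm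
      simp [hm, List.getD_eq_getElem?_getD]
      omega

-- A's Int-indexed patch list is the Nat-indexed canonical one
theorem aFix_map (ds : List Nat) (h f : List Int) :
    aFix (ds.map Int.ofNat) h f = aFixN ds h f := by
  induction ds generalizing h f with
  | nil => rfl
  | cons i rest ih => simp [aFix, aFixN, ih]

theorem aFixN_set_comm (ds : List Nat) (h f : List Int) (i : Nat) (v : Int) (hi : i ∉ ds) :
    aFixN ds (h.set i v) f = (aFixN ds h f).set i v := by
  induction ds generalizing h f with
  | nil => rfl
  | cons j rest ih =>
    simp only [aFixN]
    rw [List.set_comm _ _ (fun he => hi (by simp [he])), ih _ _ (fun hm => hi (by simp [hm]))]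

theorem aFixN_append (as : List Nat) (fs : List Int) (i : Nat) (v : Int) (h : List Int)
    (hlen : fs.length = as.length) :
    aFixN (as ++ [i]) h (fs ++ [v]) = (aFixN as h fs).set i v := by
  induction as generalizing fs h with
  | nil =>
    have : fs = [] := List.eq_nil_of_length_eq_zero hlen
    subst this; rfl
  | cons a as' ih =>
    cases fs with
    | nil => simp at hlen
    | cons w fs' =>
      simp only [List.cons_append, aFixN, List.headD_cons, List.tail_cons]
      exact ih fs' _ (by simpa using hlen)

theorem aFixN_reverse (ds : List Nat) (f h : List Int)
    (hlen : f.length = ds.length) (hnd : ds.Pairwise (· ≠ ·)) :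
    aFixN ds.reverse h f.reverse = aFixN ds h f := by
  induction ds generalizing f h with
  | nil =>
    have : f = [] := List.eq_nil_of_length_eq_zero hlen
    subst this; rfl
  | cons i ds' ih =>
    cases f with
    | nil => simp at hlen
    | cons v f' =>
      simp only [List.reverse_cons]
      rw [aFixN_append _ _ _ _ _ (by simpa using hlen),
        ih f' h (by simpa using hlen) (List.Pairwise.of_cons hnd),
        ← aFixN_set_comm _ _ _ _ _ (by
          intro hm
          exact (List.rel_of_pairwise_cons hnd hm) rfl)]
      rfl

theorem aFixN_take (ds : List Nat) (h f : List Int) :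
    aFixN ds h (f.take ds.length) = aFixN ds h f := by
  induction ds generalizing h f with
  | nil => rfl
  | cons i rest ih =>
    cases f with
    | nil => simp [aFixN]
    | cons v f' => simp [aFixN, ih]

-- ===== VERDICT (by name: the statement is the Claim_ definition above) =====
theorem reparar_con_diferencia_spec : Claim_equal_reparar_con_diferencia := by
  intro hijo padre _ hpre
  unfold Spec_reparar_con_diferencia reparar_con_diferencia reparar_con_diferencia_alt
  simp only
  set n := hijo.length with hn
  -- identify B's counter and its size
  have hcounter : hijo.foldl (fun d g => d.insert g (d.getD g 0 + 1)) PySem.Dict.empty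
      = PySem.Dict.counter hijo := PySem.Dict.foldl_insert_getD_add_one_eq_counter hijo
  have hsize : (PySem.Dict.counter hijo).size = (PySem.Set.ofList hijo).length := by
    simp [PySem.Dict.size, PySem.Dict.items_counter]
  -- the two filtered missing-gene lists are the same list `miss`
  set miss := padre.filter (fun g => !(hijo.contains g)) with hmiss
  have hfA : padre.filter
      (fun g => !(PySem.Set.contains (aScan (PySem.List.enumerate hijo) PySem.Set.empty).1 g))
      = miss := by
    have h1 : (aScan (PySem.List.enumerate hijo) PySem.Set.empty).1 = PySem.Set.ofList hijo :=
      aScan_fst hijo PySem.Set.empty 0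
    rw [h1, hmiss]
    apply List.filter_congr
    intro g _
    have := PySem.Set.mem_ofList hijo g
    simp only [PySem.Set.contains] at *
    by_cases hg : g ∈ hijo <;> simp_all
  have hfB : padre.filter (fun g => !((PySem.Dict.counter hijo).contains g)) = miss := by
    rw [hmiss]
    apply List.filter_congr
    intro g _
    rw [PySem.Dict.contains_counter]
  -- the canonical duplicate-index list
  set cdup := cdupAux hijo 0 hijo with hcdup
  have hddec : ddec hijo n = cdup.reverse := by
    have := ddec_eq hijo n (le_of_eq hn.symm)
    rw [List.take_length] at this
    rw [hcdup, this, List.reverse_reverse]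
  -- A reduces to the forward patch pass
  have hA : aFix (aScan (PySem.List.enumerate hijo) PySem.Set.empty).2 hijo
      (padre.filter (fun g => !(PySem.Set.contains (aScan (PySem.List.enumerate hijo) PySem.Set.empty).1 g)))
      = aFixN cdup hijo miss := by
    rw [hfA]
    have h2 : (aScan (PySem.List.enumerate hijo) PySem.Set.empty).2
        = (fwd [] 0 hijo).map Int.ofNat := by
      exact aScan_snd hijo [] PySem.Set.empty 0 (fun g => by simp [PySem.Set.contains, PySem.Set.empty])
    rw [h2, aFix_map]
    congr 1
    rw [hcdup]
    exact fwd_eq_cdupAux hijo hijo [] 0 (by simp) (fun g => by simp)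
  rw [hA, hcounter, hsize, hfB]
  -- B reduces to the backward patch pass over ddec
  have hB : bBack hijo (miss.take (n - (PySem.Set.ofList hijo).length)) (PySem.Dict.counter hijo)
      (List.range n).reverse
      = aFixN (ddec hijo n) hijo (miss.take (n - (PySem.Set.ofList hijo).length)).reverse := by
    apply bBack_eq hijo n _ _ _ (le_of_eq hn.symm)
    · intro x
      rw [← hcounter, PySem.Dict.getD_foldl_insert_add_one, List.take_length]
      simp [PySem.Dict.empty, PySem.Dict.getD, PySem.Dict.get?]
    · intro j _; rfl
  rw [hn] at hB ⊢
  rw [hB, hddec]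
  -- lengths: the truncated replacement list has exactly as many entries as cdup
  have hlen : (ddec hijo n).length + (PySem.Set.ofList hijo).length = n := by
    have := ddec_length hijo n (le_of_eq hn.symm)
    rwa [List.take_length] at this
  have hc2 : cdup.length + (PySem.Set.ofList hijo).length = n := by
    rw [← List.length_reverse (as := cdup), ← hddec]
    exact hlen
  have hcl : cdup.length = n - (PySem.Set.ofList hijo).length := by omega
  have hmlen : cdup.length ≤ miss.length := by
    unfold Pre_reparar_con_diferencia at hpre
    rw [hcl, hmiss, hn]
    exact hpre
  rw [← hcl]
  rw [aFixN_reverse cdup (miss.take cdup.length) hijo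
    (by rw [List.length_take]; omega)
    ((cdupAux_pairwise hijo hijo 0).imp (fun hab => Nat.ne_of_lt hab))]
  exact (aFixN_take cdup hijo miss).symm
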